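-- pv_equiv track=rewrite | github.com/loreaferreno/2021_2022-PNE-practices | Exam P3/Seq1.py | valid_sequence2
-- ===== SOURCE A (Python) =====
-- def valid_sequence2(sequence):
--     valid = True
--     i = 0
--     while i < len(sequence):
--         c = sequence[i]
--         if c != "A" and c != "C" and c != "G" and c != "T":
--             valid = False
--         i += 1
--     return valid
-- ===== SOURCE B (Python) =====
-- def valid_sequence2(sequence):
--     nucleotides = sequence.count("A") + sequence.count("C") \
--         + sequence.count("G") + sequence.count("T")
--     return nucleotides == len(sequence)
-- ===== Notes on version B (the rewrite author's own statement) =====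
-- stated objective: alternative
-- what changed: Replaces the per-character boolean-flag scan by an arithmetic identity: count each of the four nucleotides (four str.count passes) and declare the sequence valid iff the counts sum to the full length.
import Mathlib
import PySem

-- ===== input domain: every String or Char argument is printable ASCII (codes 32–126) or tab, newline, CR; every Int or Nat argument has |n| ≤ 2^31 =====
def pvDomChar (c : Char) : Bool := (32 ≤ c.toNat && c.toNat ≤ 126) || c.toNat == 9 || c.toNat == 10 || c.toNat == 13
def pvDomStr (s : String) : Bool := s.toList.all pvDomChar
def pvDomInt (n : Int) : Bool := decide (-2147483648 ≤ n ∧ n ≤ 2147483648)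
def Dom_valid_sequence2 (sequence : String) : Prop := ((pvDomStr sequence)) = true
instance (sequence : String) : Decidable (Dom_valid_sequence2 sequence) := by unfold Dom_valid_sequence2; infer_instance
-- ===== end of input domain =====

-- B replaces A's flag-carrying scan by an arithmetic identity: the four nucleotide counts sum to the length iff every character is a nucleotide (alternative decomposition, same cost).

-- ===== PORT A =====
-- while loop over positions, clearing the flag on a non-nucleotide: folded over the characters in order
def valid_sequence2 (sequence : String) : Bool :=
  sequence.toList.foldl
    (fun valid c => if c ≠ 'A' ∧ c ≠ 'C' ∧ c ≠ 'G' ∧ c ≠ 'T' then false else valid)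
    true

-- ===== PORT B =====
def valid_sequence2_alt (sequence : String) : Bool :=
  let nucleotides : Nat :=
    PySem.Str.count sequence "A" + PySem.Str.count sequence "C"
      + PySem.Str.count sequence "G" + PySem.Str.count sequence "T"
  nucleotides == PySem.Str.len sequence

-- ===== PRECONDITION & SPEC =====
def Spec_valid_sequence2 (sequence : String) (out : Bool) : Prop := out = valid_sequence2_alt sequence
instance (sequence : String) (out : Bool) : Decidable (Spec_valid_sequence2 sequence out) := by unfold Spec_valid_sequence2; infer_instance

-- ===== CLAIM (what is proved, stated in full; the proofs are below) =====
def Claim_equal_valid_sequence2 : Prop := ∀ (sequence : String), Dom_valid_sequence2 sequence → Spec_valid_sequence2 sequence (valid_sequence2 sequence)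

-- ===== LEMMAS AND PROOFS =====

def pvIsNuc (c : Char) : Bool := c = 'A' ∨ c = 'C' ∨ c = 'G' ∨ c = 'T'

theorem pvFoldA (l : List Char) (b : Bool) :
    l.foldl (fun valid c => if c ≠ 'A' ∧ c ≠ 'C' ∧ c ≠ 'G' ∧ c ≠ 'T' then false else valid) b
      = (b && l.all pvIsNuc) := by
  induction l generalizing b with
  | nil => simp
  | cons c l ih =>
    simp only [List.foldl, List.all_cons, ih]
    by_cases hA : c = 'A' <;> by_cases hC : c = 'C' <;> by_cases hG : c = 'G' <;>
      by_cases hT : c = 'T' <;> simp [pvIsNuc, hA, hC, hG, hT]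

-- Python str.count with a single-character pattern is the plain character count
theorem pvCountGoSingle (c : Char) (l : List Char) :
    ∀ (fuel acc : Nat), l.length ≤ fuel →
      PySem.Chars.count.go [c] fuel l acc = acc + l.count c := by
  induction l with
  | nil => intro fuel acc _; cases fuel <;> simp [PySem.Chars.count.go]
  | cons h t ih =>
    intro fuel acc hle
    cases fuel with
    | zero => simp at hle
    | succ fuel =>
      rw [PySem.Chars.count.go]
      by_cases hc : c = h
      · subst hc
        have hpre : [c].isPrefixOf (c :: t) = true := by
          simp [List.isPrefixOf]
        simp only [hpre, if_true, List.length_cons, List.length_nil, List.drop_succ_cons,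
          List.drop_zero]
        rw [ih fuel (acc + 1) (Nat.le_of_succ_le_succ hle)]
        simp
        omega
      · have hpre : [c].isPrefixOf (h :: t) = false := by
          simp [List.isPrefixOf, hc]
        simp only [hpre, Bool.false_eq_true, if_false]
        rw [ih fuel acc (Nat.le_of_succ_le_succ hle)]
        simp [Ne.symm hc]

theorem pvStrCountSingle (s : String) (c : Char) :
    PySem.Chars.count s.toList [c] = s.toList.count c := by
  have : ([c] : List Char).isEmpty = false := rfl
  simp only [PySem.Chars.count, this, Bool.false_eq_true, if_false]
  rw [pvCountGoSingle c s.toList s.toList.length 0 (Nat.le_refl _)]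
  simp

-- the four counts sum to countP pvIsNuc
theorem pvCountSum (l : List Char) :
    l.count 'A' + l.count 'C' + l.count 'G' + l.count 'T' = l.countP pvIsNuc := by
  induction l with
  | nil => simp
  | cons c l ih =>
    simp only [List.count_cons, List.countP_cons]
    by_cases hA : c = 'A' <;> by_cases hC : c = 'C' <;> by_cases hG : c = 'G' <;>
      by_cases hT : c = 'T' <;> simp_all [pvIsNuc] <;> omega

-- ===== VERDICT (by name: the statement is the Claim_ definition above) =====
theorem valid_sequence2_spec : Claim_equal_valid_sequence2 := by
  intro s _
  show valid_sequence2 s = valid_sequence2_alt s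
  unfold valid_sequence2 valid_sequence2_alt
  rw [pvFoldA]
  have hA : ("A" : String).toList = ['A'] := rfl
  have hC : ("C" : String).toList = ['C'] := rfl
  have hG : ("G" : String).toList = ['G'] := rfl
  have hT : ("T" : String).toList = ['T'] := rfl
  simp only [Bool.true_and, PySem.Str.count, PySem.Str.len, hA, hC, hG, hT, pvStrCountSingle]
  rw [pvCountSum]
  rcases hb : s.toList.all pvIsNuc with _ | _
  · have : s.toList.countP pvIsNuc ≠ s.toList.length := by
      intro h
      rw [List.countP_eq_length] at h
      rw [List.all_eq_false] at hb
      obtain ⟨x, hx, hpx⟩ := hb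
      exact hpx (h x hx)
    simpa [← String.length_toList] using this
  · have : s.toList.countP pvIsNuc = s.toList.length := by
      rw [List.countP_eq_length]
      rw [List.all_eq_true] at hb
      exact hb
    simpa [← String.length_toList] using this
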